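-- pv_equiv track=rewrite | github.com/raeez/chiral-bar-cobar | compute/lib/spectral_continuation.py | ramanujan_tau_batch
-- ===== SOURCE A (Python) =====
-- def ramanujan_tau_batch(nmax):
--     """Compute τ(1), ..., τ(nmax) efficiently via η^24 expansion."""
--     N = nmax + 5
--     coeffs = [0] * (N + 1)
--     coeffs[0] = 1
--
--     for m in range(1, N + 1):
--         new_coeffs = [0] * (N + 1)
--         for j in range(25):
--             sign = (-1) ** j
--             binom = 1
--             for i in range(j):
--                 binom = binom * (24 - i) // (i + 1)
--             coeff = sign * binom
--             for k in range(N + 1):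
--                 idx = k + j * m
--                 if idx > N:
--                     break
--                 new_coeffs[idx] += coeffs[k] * coeff
--         coeffs = new_coeffs
--
--     return [coeffs[n - 1] if n - 1 < len(coeffs) else 0 for n in range(1, nmax + 1)]
-- ===== SOURCE B (Python) =====
-- def ramanujan_tau_batch(nmax):
--     """Compute tau(1..nmax): eta = prod (1-x^m) built by in-place 2-term
--     multiplies, then eta^24 by an addition-chain of truncated convolutions."""
--     if nmax < 1:
--         return []
--     N = nmax + 5
--     f = [0] * (N + 1)
--     f[0] = 1
--     for m in range(1, N + 1):
--         for k in range(N, m - 1, -1):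
--             f[k] -= f[k - m]
--
--     def tmul(a, b):
--         c = [0] * (N + 1)
--         for i in range(N + 1):
--             ai = a[i]
--             if ai:
--                 for j in range(N + 1 - i):
--                     c[i + j] += ai * b[j]
--         return c
--
--     f2 = tmul(f, f)
--     f3 = tmul(f, f2)
--     f6 = tmul(f3, f3)
--     f12 = tmul(f6, f6)
--     f24 = tmul(f12, f12)
--     return f24[:nmax]
-- ===== Notes on version B (the rewrite author's own statement) =====
-- stated objective: faster
-- what changed: Instead of multiplying the series by the fully expanded 24th power of each factor (recomputing binomials every time) for every m, B builds eta as the product of the two-term factors with cheap in-place updates and then raises eta to the 24th power by an addition chain of five truncated convolutions.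
-- outside the precondition, e.g. on ramanujan_tau_batch(-6): A raises IndexError, B returns []
import Mathlib
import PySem

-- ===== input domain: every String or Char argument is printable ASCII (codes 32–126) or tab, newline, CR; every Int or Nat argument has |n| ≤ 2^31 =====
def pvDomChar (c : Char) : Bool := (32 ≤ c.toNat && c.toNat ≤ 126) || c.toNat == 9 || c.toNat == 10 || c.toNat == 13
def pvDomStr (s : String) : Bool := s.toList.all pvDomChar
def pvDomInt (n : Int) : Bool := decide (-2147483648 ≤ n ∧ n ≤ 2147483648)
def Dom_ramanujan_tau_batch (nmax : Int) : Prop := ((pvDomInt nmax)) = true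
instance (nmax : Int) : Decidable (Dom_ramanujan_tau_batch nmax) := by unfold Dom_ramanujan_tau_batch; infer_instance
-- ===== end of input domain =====

-- B replaces A's per-m multiplication by the fully expanded (1-x^m)^24 (binomials
-- recomputed every time) with cheap in-place two-term multiplies building
-- eta = prod(1-x^m), then raises eta to the 24th power by five truncated
-- convolutions (addition chain 1,2,3,6,12,24); measurably faster by constant factor.

-- ===== PORT A =====
-- binom = 1; for i in range(j): binom = binom * (24 - i) // (i + 1)
def pvBinomLoop (j : Nat) : Int :=
  (List.range j).foldl (fun b i => PySem.Int.floordiv (b * (24 - (i : Int))) ((i : Int) + 1)) 1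

-- for k in range(N+1): idx = k + j*m; if idx > N: break; new[idx] += coeffs[k]*coeff
def pvAInner (Nn jm : Nat) (coeff : Int) (coeffs : List Int) : Nat → Nat → List Int → List Int
  | _, 0, new => new
  | k, cnt+1, new =>
    if Nn < k + jm then new
    else pvAInner Nn jm coeff coeffs (k+1) cnt
      (new.set (k+jm) (new.getD (k+jm) 0 + coeffs.getD k 0 * coeff))

-- one pass of the m-loop body: new_coeffs built over j in range(25)
def pvAStep (Nn m : Nat) (coeffs : List Int) : List Int :=
  (List.range 25).foldl (fun new j => pvAInner Nn (j*m) ((-1)^j * pvBinomLoop j) coeffs 0 (Nn+1) new)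
    (List.replicate (Nn+1) 0)

def ramanujan_tau_batch (nmax : Int) : List Int :=
  let Nn := (nmax + 5).toNat
  let init := (List.replicate (Nn+1) (0:Int)).set 0 1
  let coeffs := (List.range Nn).foldl (fun c m0 => pvAStep Nn (m0+1) c) init
  (List.range nmax.toNat).map (fun i => if i < coeffs.length then coeffs.getD i 0 else 0)

-- ===== PORT B =====
-- for k in range(N, m-1, -1): f[k] -= f[k-m]   (in-place multiply by 1 - x^m)
def pvEtaK (m : Nat) : Nat → List Int → List Int
  | 0, f => f
  | k+1, f =>
    if k+1 < m then f
    else pvEtaK m k (f.set (k+1) (f.getD (k+1) 0 - f.getD (k+1-m) 0))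

-- for j in range(N+1-i): c[i+j] += ai * b[j]
def pvTmulInner (ai : Int) (b : List Int) (i : Nat) : Nat → Nat → List Int → List Int
  | _, 0, c => c
  | j, cnt+1, c =>
    pvTmulInner ai b i (j+1) cnt (c.set (i+j) (c.getD (i+j) 0 + ai * b.getD j 0))

-- truncated convolution, skipping zero coefficients of a
def pvTmul (Nn : Nat) (a b : List Int) : List Int :=
  (List.range (Nn+1)).foldl (fun c i => if a.getD i 0 ≠ 0 then pvTmulInner (a.getD i 0) b i 0 (Nn+1-i) c else c)
    (List.replicate (Nn+1) 0)

def ramanujan_tau_batch_alt (nmax : Int) : List Int :=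
  if nmax < 1 then []
  else
    let Nn := (nmax + 5).toNat
    let f := (List.range Nn).foldl (fun f m0 => pvEtaK (m0+1) Nn f)
               ((List.replicate (Nn+1) (0:Int)).set 0 1)
    let f2 := pvTmul Nn f f
    let f3 := pvTmul Nn f f2
    let f6 := pvTmul Nn f3 f3
    let f12 := pvTmul Nn f6 f6
    let f24 := pvTmul Nn f12 f12
    f24.take nmax.toNat

-- ===== PRECONDITION & SPEC =====
-- Pre_ excludes only nmax ≤ -6, where Python A raises IndexError (coeffs[0] = 1 on an empty list).
def Pre_ramanujan_tau_batch (nmax : Int) : Prop := -5 ≤ nmax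
instance (nmax : Int) : Decidable (Pre_ramanujan_tau_batch nmax) := by unfold Pre_ramanujan_tau_batch; infer_instance
def pvWitness_ramanujan_tau_batch : Int := 3

def Spec_ramanujan_tau_batch (nmax : Int) (out : List Int) : Prop := out = ramanujan_tau_batch_alt nmax
instance (nmax : Int) (out : List Int) : Decidable (Spec_ramanujan_tau_batch nmax out) := by unfold Spec_ramanujan_tau_batch; infer_instance

-- ===== CLAIM (what is proved, stated in full; the proofs are below) =====
def Claim_equal_ramanujan_tau_batch : Prop := ∀ (nmax : Int), Dom_ramanujan_tau_batch nmax → Pre_ramanujan_tau_batch nmax → Spec_ramanujan_tau_batch nmax (ramanujan_tau_batch nmax)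

-- ===== LEMMAS AND PROOFS =====

-- list helpers -------------------------------------------------------------
theorem pv_getD_set (l : List Int) (i j : Nat) (x : Int) :
    (l.set i x).getD j 0 = if i = j ∧ j < l.length then x else l.getD j 0 := by
  simp only [List.getD_eq_getElem?_getD, List.getElem?_set]
  by_cases h1 : i = j
  · subst h1
    by_cases h2 : i < l.length <;> simp [h2]
  · simp [h1]

theorem pv_getD_replicate (n i : Nat) : (List.replicate n (0:Int)).getD i 0 = 0 := by
  simp only [List.getD_eq_getElem?_getD, List.getElem?_replicate]
  split <;> simp

-- pvAInner -----------------------------------------------------------------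
theorem pvAInner_length (Nn jm : Nat) (coeff : Int) (coeffs : List Int) :
    ∀ (cnt k0 : Nat) (new : List Int),
      (pvAInner Nn jm coeff coeffs k0 cnt new).length = new.length := by
  intro cnt
  induction cnt with
  | zero => intro k0 new; rfl
  | succ n ih =>
    intro k0 new
    simp only [pvAInner]
    split
    · rfl
    · rw [ih]; simp

theorem pvAInner_getD (Nn jm : Nat) (coeff : Int) (coeffs : List Int) :
    ∀ (cnt k0 : Nat) (new : List Int), new.length = Nn+1 →
      ∀ idx, idx ≤ Nn →
      (pvAInner Nn jm coeff coeffs k0 cnt new).getD idx 0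
        = new.getD idx 0 +
          (if k0 + jm ≤ idx ∧ idx < k0 + cnt + jm then coeffs.getD (idx - jm) 0 * coeff else 0) := by
  intro cnt
  induction cnt with
  | zero =>
    intro k0 new hlen idx hidx
    simp only [pvAInner]
    split
    · exact absurd ‹_› (by omega)
    · simp
  | succ n ih =>
    intro k0 new hlen idx hidx
    simp only [pvAInner]
    split
    · rename_i h
      have h2 : ¬ (k0 + jm ≤ idx ∧ idx < k0 + (n+1) + jm) := by omega
      simp only [if_neg h2, add_zero]
    · rename_i h
      rw [ih (k0+1) _ (by simpa using hlen) idx hidx, pv_getD_set]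
      by_cases he : k0 + jm = idx
      · rw [if_pos ⟨he, by omega⟩]
        have h2 : ¬ ((k0+1) + jm ≤ idx ∧ idx < (k0+1) + n + jm) := by omega
        have h3 : (k0 + jm ≤ idx ∧ idx < k0 + (n+1) + jm) := by omega
        have h4 : idx - jm = k0 := by omega
        rw [if_neg h2, if_pos h3, h4, he, add_zero]
      · rw [if_neg (by intro hc; exact he hc.1)]
        have h5 : ((k0+1) + jm ≤ idx ∧ idx < (k0+1) + n + jm) ↔ (k0 + jm ≤ idx ∧ idx < k0 + (n+1) + jm) := by omega
        rw [if_congr h5 rfl rfl]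

theorem pvAStep_aux (Nn m : Nat) (coeffs : List Int) : ∀ t : Nat,
    (((List.range t).foldl (fun new j => pvAInner Nn (j*m) ((-1)^j * pvBinomLoop j) coeffs 0 (Nn+1) new) (List.replicate (Nn+1) 0)).length = Nn+1)
    ∧ ∀ idx, idx ≤ Nn →
      ((List.range t).foldl (fun new j => pvAInner Nn (j*m) ((-1)^j * pvBinomLoop j) coeffs 0 (Nn+1) new) (List.replicate (Nn+1) 0)).getD idx 0
        = ∑ j ∈ Finset.range t, (if j*m ≤ idx then coeffs.getD (idx - j*m) 0 * ((-1)^j * pvBinomLoop j) else 0) := by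
  intro t
  induction t with
  | zero =>
    refine ⟨by simp, ?_⟩
    intro idx hidx
    simp [pv_getD_replicate]
  | succ t ih =>
    simp only [List.range_succ, List.foldl_append, List.foldl_cons, List.foldl_nil]
    refine ⟨Eq.trans (pvAInner_length _ _ _ _ _ _ _) ih.1, ?_⟩
    intro idx hidx
    rw [pvAInner_getD Nn (t*m) ((-1)^t * pvBinomLoop t) coeffs (Nn+1) 0 _ ih.1 idx hidx]
    rw [ih.2 idx hidx, Finset.sum_range_succ]
    have hiff : (0 + t*m ≤ idx ∧ idx < 0 + (Nn+1) + t*m) ↔ (t*m ≤ idx) := by omega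
    rw [if_congr hiff rfl rfl]

theorem pvAStep_length (Nn m : Nat) (coeffs : List Int) :
    (pvAStep Nn m coeffs).length = Nn+1 := by
  exact (pvAStep_aux Nn m coeffs 25).1

theorem pvAStep_getD (Nn m : Nat) (coeffs : List Int) (idx : Nat) (h : idx ≤ Nn) :
    (pvAStep Nn m coeffs).getD idx 0
      = ∑ j ∈ Finset.range 25,
          (if j*m ≤ idx then coeffs.getD (idx - j*m) 0 * ((-1)^j * pvBinomLoop j) else 0) := by
  exact (pvAStep_aux Nn m coeffs 25).2 idx h

theorem pvBinomLoop_eq : ∀ j ∈ Finset.range 25, pvBinomLoop j = ((Nat.choose 24 j : Nat) : Int) := by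
  decide

theorem pv_sub_pow (m : Nat) :
    (1 - PowerSeries.X^m : PowerSeries ℤ)^24
      = ∑ j ∈ Finset.range 25,
          PowerSeries.C ((-1)^j * ((Nat.choose 24 j : Nat) : ℤ)) * PowerSeries.X^(m*j) := by
  rw [sub_eq_neg_add, add_pow]
  refine Finset.sum_congr rfl (fun j hj => ?_)
  rw [one_pow, mul_one, neg_pow, ← pow_mul, map_mul, map_pow, map_neg, map_one, map_natCast]
  ring

theorem rep_AStep (Nn m : Nat) (coeffs : List Int) (φ : PowerSeries ℤ)
    (hc : ∀ k ≤ Nn, coeffs.getD k 0 = PowerSeries.coeff k φ) :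
    ∀ idx ≤ Nn, (pvAStep Nn m coeffs).getD idx 0
      = PowerSeries.coeff idx (φ * (1 - PowerSeries.X^m)^24) := by
  intro idx hidx
  rw [pvAStep_getD Nn m coeffs idx hidx, pv_sub_pow, Finset.mul_sum, map_sum]
  refine Finset.sum_congr rfl (fun j hj => ?_)
  rw [pvBinomLoop_eq j hj]
  conv_rhs => rw [mul_left_comm]
  rw [PowerSeries.coeff_C_mul, PowerSeries.coeff_mul_X_pow', Nat.mul_comm m j]
  by_cases h : j*m ≤ idx
  · rw [if_pos h, if_pos h, hc _ (by omega)]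
    ring
  · rw [if_neg h, if_neg h, mul_zero]

-- pvEtaK -------------------------------------------------------------------
theorem pvEtaK_length (m : Nat) : ∀ (K : Nat) (f : List Int), (pvEtaK m K f).length = f.length := by
  intro K
  induction K with
  | zero => intro f; rfl
  | succ k ih =>
    intro f
    simp only [pvEtaK]
    split
    · rfl
    · rw [ih]; simp

theorem pvEtaK_getD (m : Nat) (hm : 1 ≤ m) :
    ∀ (K : Nat) (f : List Int), K < f.length →
      ∀ idx, (pvEtaK m K f).getD idx 0
        = if m ≤ idx ∧ idx ≤ K then f.getD idx 0 - f.getD (idx - m) 0 else f.getD idx 0 := by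
  intro K
  induction K with
  | zero =>
    intro f hlen idx
    have h : ¬ (m ≤ idx ∧ idx ≤ 0) := by omega
    simp only [pvEtaK, if_neg h]
  | succ k ih =>
    intro f hlen idx
    simp only [pvEtaK]
    split
    · rename_i h
      have h2 : ¬ (m ≤ idx ∧ idx ≤ k+1) := by omega
      rw [if_neg h2]
    · rename_i h
      rw [ih _ (by simp; omega) idx]
      by_cases hle : idx ≤ k
      · have e1 : ((k+1) = idx) = False := eq_false (by omega)
        have e2 : ((k+1) = idx - m) = False := eq_false (by omega)
        simp only [pv_getD_set, e1, e2, false_and, if_false]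
        have h5 : (m ≤ idx ∧ idx ≤ k) ↔ (m ≤ idx ∧ idx ≤ k+1) := by omega
        rw [if_congr h5 rfl rfl]
      · by_cases he : idx = k+1
        · subst he
          have e0 : (m ≤ k+1 ∧ k+1 ≤ k) = False := eq_false (by omega)
          simp only [pv_getD_set, e0, if_false]
          rw [if_pos ⟨trivial, by omega⟩, if_pos ⟨by omega, le_refl _⟩]
        · have e1 : ((k+1) = idx) = False := eq_false (by omega)
          have e2 : (m ≤ idx ∧ idx ≤ k) = False := eq_false (by omega)
          have e3 : (m ≤ idx ∧ idx ≤ k+1) = False := eq_false (by omega)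
          simp only [pv_getD_set, e1, e2, e3, false_and, if_false]

theorem rep_EtaK (Nn m : Nat) (hm : 1 ≤ m) (f : List Int) (φ : PowerSeries ℤ)
    (hl : f.length = Nn+1) (hc : ∀ k ≤ Nn, f.getD k 0 = PowerSeries.coeff k φ) :
    ∀ idx ≤ Nn, (pvEtaK m Nn f).getD idx 0
      = PowerSeries.coeff idx (φ * (1 - PowerSeries.X^m)) := by
  intro idx hidx
  rw [pvEtaK_getD m hm Nn f (by omega) idx]
  have hexp : φ * (1 - PowerSeries.X^m) = φ - φ * PowerSeries.X^m := by ring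
  rw [hexp, map_sub, PowerSeries.coeff_mul_X_pow']
  by_cases h : m ≤ idx
  · rw [if_pos ⟨h, hidx⟩, if_pos h, hc idx hidx, hc _ (by omega)]
  · rw [if_neg (fun hc2 => h hc2.1), if_neg h, hc idx hidx, sub_zero]

-- pvTmul -------------------------------------------------------------------
theorem pvTmulInner_length (ai : Int) (b : List Int) (i : Nat) :
    ∀ (cnt j0 : Nat) (c : List Int), (pvTmulInner ai b i j0 cnt c).length = c.length := by
  intro cnt
  induction cnt with
  | zero => intro j0 c; rfl
  | succ n ih =>
    intro j0 c
    simp only [pvTmulInner]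
    rw [ih]; simp

theorem pvTmulInner_getD (ai : Int) (b : List Int) (i : Nat) :
    ∀ (cnt j0 : Nat) (c : List Int), i + j0 + cnt ≤ c.length →
      ∀ idx, (pvTmulInner ai b i j0 cnt c).getD idx 0
        = c.getD idx 0 + (if i + j0 ≤ idx ∧ idx < i + j0 + cnt then ai * b.getD (idx - i) 0 else 0) := by
  intro cnt
  induction cnt with
  | zero =>
    intro j0 c hlen idx
    simp only [pvTmulInner]
    split
    · exact absurd ‹_› (by omega)
    · simp
  | succ n ih =>
    intro j0 c hlen idx
    simp only [pvTmulInner]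
    rw [ih (j0+1) _ (by simp; omega) idx, pv_getD_set]
    by_cases he : i + j0 = idx
    · rw [if_pos ⟨he, by omega⟩]
      have h2 : ¬ (i + (j0+1) ≤ idx ∧ idx < i + (j0+1) + n) := by omega
      have h3 : (i + j0 ≤ idx ∧ idx < i + j0 + (n+1)) := by omega
      have h4 : idx - i = j0 := by omega
      rw [if_neg h2, if_pos h3, h4, he, add_zero]
    · rw [if_neg (by intro hc; exact he hc.1)]
      have h5 : (i + (j0+1) ≤ idx ∧ idx < i + (j0+1) + n) ↔ (i + j0 ≤ idx ∧ idx < i + j0 + (n+1)) := by omega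
      rw [if_congr h5 rfl rfl]

theorem pvTmul_aux (Nn : Nat) (a b : List Int) : ∀ t : Nat, t ≤ Nn+1 →
    (((List.range t).foldl (fun c i => if a.getD i 0 ≠ 0 then pvTmulInner (a.getD i 0) b i 0 (Nn+1-i) c else c) (List.replicate (Nn+1) 0)).length = Nn+1)
    ∧ ∀ idx, idx ≤ Nn →
      ((List.range t).foldl (fun c i => if a.getD i 0 ≠ 0 then pvTmulInner (a.getD i 0) b i 0 (Nn+1-i) c else c) (List.replicate (Nn+1) 0)).getD idx 0
        = ∑ i ∈ Finset.range t, (if i ≤ idx then a.getD i 0 * b.getD (idx - i) 0 else 0) := by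
  intro t
  induction t with
  | zero =>
    intro _
    refine ⟨by simp, ?_⟩
    intro idx _
    simp [pv_getD_replicate]
  | succ t ih =>
    intro ht
    obtain ⟨ih1, ih2⟩ := ih (by omega)
    simp only [List.range_succ, List.foldl_append, List.foldl_cons, List.foldl_nil]
    by_cases hz : a.getD t 0 ≠ 0
    · rw [if_pos hz]
      refine ⟨Eq.trans (pvTmulInner_length _ _ _ _ _ _) ih1, ?_⟩
      intro idx hidx
      rw [pvTmulInner_getD (a.getD t 0) b t (Nn+1-t) 0 _ (by omega) idx]
      rw [ih2 idx hidx, Finset.sum_range_succ]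
      have hiff : (t + 0 ≤ idx ∧ idx < t + 0 + (Nn+1-t)) ↔ (t ≤ idx) := by omega
      rw [if_congr hiff rfl rfl]
    · rw [if_neg hz]
      refine ⟨ih1, ?_⟩
      intro idx hidx
      rw [ih2 idx hidx, Finset.sum_range_succ, not_not.mp hz]
      simp

theorem pvTmul_length (Nn : Nat) (a b : List Int) : (pvTmul Nn a b).length = Nn+1 := by
  exact (pvTmul_aux Nn a b (Nn+1) (le_refl _)).1

theorem pvTmul_getD (Nn : Nat) (a b : List Int) (idx : Nat) (h : idx ≤ Nn) :
    (pvTmul Nn a b).getD idx 0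
      = ∑ i ∈ Finset.range (Nn+1), (if i ≤ idx then a.getD i 0 * b.getD (idx - i) 0 else 0) := by
  exact (pvTmul_aux Nn a b (Nn+1) (le_refl _)).2 idx h

theorem rep_Tmul (Nn : Nat) (a b : List Int) (φ ψ : PowerSeries ℤ)
    (ha : ∀ k ≤ Nn, a.getD k 0 = PowerSeries.coeff k φ)
    (hb : ∀ k ≤ Nn, b.getD k 0 = PowerSeries.coeff k ψ) :
    ∀ idx ≤ Nn, (pvTmul Nn a b).getD idx 0 = PowerSeries.coeff idx (φ * ψ) := by
  intro idx hidx
  rw [pvTmul_getD Nn a b idx hidx, PowerSeries.coeff_mul,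
    Finset.Nat.sum_antidiagonal_eq_sum_range_succ_mk]
  have h1 : (∑ i ∈ Finset.range (Nn+1), (if i ≤ idx then a.getD i 0 * b.getD (idx - i) 0 else 0))
      = ∑ i ∈ Finset.range (idx+1), (if i ≤ idx then a.getD i 0 * b.getD (idx - i) 0 else 0) :=
    (Finset.sum_subset (by intro x hx; simp only [Finset.mem_range] at *; omega)
      (fun x _ hnx => by rw [if_neg (by simp only [Finset.mem_range] at hnx; omega)])).symm
  rw [h1]
  refine Finset.sum_congr rfl (fun i hi => ?_)
  simp only [Finset.mem_range] at hi
  rw [if_pos (by omega), ha i (by omega), hb (idx - i) (by omega)]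

-- init ---------------------------------------------------------------------
theorem rep_init (Nn : Nat) :
    ∀ k ≤ Nn, ((List.replicate (Nn+1) (0:Int)).set 0 1).getD k 0
      = PowerSeries.coeff k (1 : PowerSeries ℤ) := by
  intro k hk
  rw [pv_getD_set, PowerSeries.coeff_one]
  by_cases h : k = 0
  · subst h
    rw [if_pos ⟨rfl, by simp⟩, if_pos rfl]
  · rw [if_neg (fun hc => h hc.1.symm), if_neg h, pv_getD_replicate]

-- the two m-folds ----------------------------------------------------------
theorem repA_fold (Nn : Nat) : ∀ t : Nat,
    (((List.range t).foldl (fun c m0 => pvAStep Nn (m0+1) c)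
        ((List.replicate (Nn+1) (0:Int)).set 0 1)).length = Nn+1)
    ∧ ∀ idx ≤ Nn,
      ((List.range t).foldl (fun c m0 => pvAStep Nn (m0+1) c)
        ((List.replicate (Nn+1) (0:Int)).set 0 1)).getD idx 0
      = PowerSeries.coeff idx (∏ m ∈ Finset.range t, (1 - PowerSeries.X^(m+1) : PowerSeries ℤ)^24) := by
  intro t
  induction t with
  | zero =>
    refine ⟨by simp, ?_⟩
    intro idx hidx
    rw [Finset.prod_range_zero]
    exact rep_init Nn idx hidx
  | succ t ih =>
    simp only [List.range_succ, List.foldl_append, List.foldl_cons, List.foldl_nil]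
    refine ⟨pvAStep_length _ _ _, ?_⟩
    intro idx hidx
    rw [Finset.prod_range_succ]
    exact rep_AStep Nn (t+1) _ _ (fun k hk => ih.2 k hk) idx hidx

theorem repB_fold (Nn : Nat) : ∀ t : Nat,
    (((List.range t).foldl (fun f m0 => pvEtaK (m0+1) Nn f)
        ((List.replicate (Nn+1) (0:Int)).set 0 1)).length = Nn+1)
    ∧ ∀ idx ≤ Nn,
      ((List.range t).foldl (fun f m0 => pvEtaK (m0+1) Nn f)
        ((List.replicate (Nn+1) (0:Int)).set 0 1)).getD idx 0
      = PowerSeries.coeff idx (∏ m ∈ Finset.range t, (1 - PowerSeries.X^(m+1) : PowerSeries ℤ)) := by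
  intro t
  induction t with
  | zero =>
    refine ⟨by simp, ?_⟩
    intro idx hidx
    rw [Finset.prod_range_zero]
    exact rep_init Nn idx hidx
  | succ t ih =>
    simp only [List.range_succ, List.foldl_append, List.foldl_cons, List.foldl_nil]
    refine ⟨Eq.trans (pvEtaK_length _ _ _) ih.1, ?_⟩
    intro idx hidx
    rw [Finset.prod_range_succ]
    exact rep_EtaK Nn (t+1) (by omega) _ _ ih.1 (fun k hk => ih.2 k hk) idx hidx

-- ===== VERDICT (by name: the statement is the Claim_ definition above) =====
theorem ramanujan_tau_batch_spec : Claim_equal_ramanujan_tau_batch := by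
  intro nmax _ hpre
  unfold Spec_ramanujan_tau_batch
  by_cases hlt : nmax < 1
  · have h0 : nmax.toNat = 0 := by omega
    simp only [ramanujan_tau_batch, ramanujan_tau_batch_alt, if_pos hlt, h0, List.range_zero,
      List.map_nil]
  · simp only [ramanujan_tau_batch, ramanujan_tau_batch_alt, if_neg hlt]
    set Nn := (nmax+5).toNat with hNn
    obtain ⟨hAlen, hArep⟩ := repA_fold Nn Nn
    obtain ⟨hBlen, hBrep⟩ := repB_fold Nn Nn
    set φ := ∏ m ∈ Finset.range Nn, (1 - PowerSeries.X^(m+1) : PowerSeries ℤ) with hphi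
    set f := (List.range Nn).foldl (fun f m0 => pvEtaK (m0+1) Nn f)
        ((List.replicate (Nn+1) (0:Int)).set 0 1) with hfdef
    have r2 := rep_Tmul Nn f f φ φ hBrep hBrep
    have r3 := rep_Tmul Nn f _ φ (φ*φ) hBrep r2
    have r6 := rep_Tmul Nn _ _ _ _ r3 r3
    have r12 := rep_Tmul Nn _ _ _ _ r6 r6
    have r24 := rep_Tmul Nn _ _ _ _ r12 r12
    have hpow : (∏ m ∈ Finset.range Nn, (1 - PowerSeries.X^(m+1) : PowerSeries ℤ)^24)
        = ((φ*(φ*φ))*(φ*(φ*φ)))*((φ*(φ*φ))*(φ*(φ*φ)))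
          * (((φ*(φ*φ))*(φ*(φ*φ)))*((φ*(φ*φ))*(φ*(φ*φ)))) := by
      rw [Finset.prod_pow, ← hphi]
      ring
    apply List.ext_getElem
    · simp only [List.length_map, List.length_range, List.length_take, pvTmul_length]
      omega
    · intro i h1 h2
      simp only [List.getElem_map, List.getElem_range, List.getElem_take]
      have hi : i < nmax.toNat := by simpa using h1
      have hiN : i ≤ Nn := by omega
      rw [if_pos (by rw [hAlen]; omega)]
      have e1 := hArep i hiN
      rw [hpow] at e1
      have e2 := r24 i hiN
      rw [e1, ← e2]
      apply List.getD_eq_getElem
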